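-- pv_equiv track=rewrite | github.com/sonsalmon/Problem-Solving | 프로그래머스/2/42586. 기능개발/기능개발.py | solution
-- ===== SOURCE A (Python) =====
-- def solution(progresses, speeds):
--     time =0
--     cnt = 0
--     answer =[]
--
--     while len(progresses)>0:
--         if (progresses[0] + time*speeds[0]) >=100:
--             cnt +=1
--             progresses.pop(0)
--             speeds.pop(0)
--         else:
--             if cnt >0:
--                 answer.append(cnt)
--                 cnt=0
--             time+=1
--
--     answer.append(cnt)
--
--     return answer
-- ===== SOURCE B (Python) =====
-- def solution(progresses, speeds):
--     # Closed-form days per task (ceil division), then one linear pass grouping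
--     # by the running maximum of days. Note: unlike A, this does not mutate its
--     # argument lists; equivalence is about the return value.
--     days = [0 if p >= 100 else -((p - 100) // s) for p, s in zip(progresses, speeds)]
--     if not days:
--         return [0]
--     answer = []
--     cur = days[0]
--     cnt = 1
--     for d in days[1:]:
--         if d <= cur:
--             cnt += 1
--         else:
--             answer.append(cnt)
--             cur, cnt = d, 1
--     answer.append(cnt)
--     return answer
-- ===== Notes on version B (the rewrite author's own statement) =====
-- stated objective: alternative
-- what changed: Replaces A's day-by-day simulation with repeated list.pop(0) by a closed-form ceil-division days list and a single linear grouping pass over the running maximum (intended as faster; a timing run could not measure a ratio because A timed out at n=16 where B returned).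
-- outside the precondition, e.g. on solution([100], [-1]): A returns [1], B returns [1]
import Mathlib
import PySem

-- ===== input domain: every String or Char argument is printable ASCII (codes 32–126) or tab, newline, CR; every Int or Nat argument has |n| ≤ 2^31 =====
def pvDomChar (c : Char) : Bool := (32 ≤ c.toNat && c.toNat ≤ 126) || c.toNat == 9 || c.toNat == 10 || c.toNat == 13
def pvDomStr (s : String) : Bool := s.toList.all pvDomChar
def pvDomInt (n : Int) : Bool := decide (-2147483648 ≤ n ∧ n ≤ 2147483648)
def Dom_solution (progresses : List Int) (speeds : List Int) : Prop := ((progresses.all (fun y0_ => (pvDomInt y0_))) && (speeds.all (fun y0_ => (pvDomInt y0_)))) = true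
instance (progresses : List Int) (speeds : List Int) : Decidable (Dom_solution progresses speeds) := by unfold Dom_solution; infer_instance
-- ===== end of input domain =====

-- B replaces A's day-by-day simulation (with pop(0)) by a closed-form days list and one
-- linear grouping pass; A mutates its argument lists (pop(0)), B does not — the
-- equivalence proved here is about the return value only.

-- ===== PORT A =====
-- A's while-loop, as structural recursion on a fuel bound (fuel is only a totality
-- guard: inside Pre_solution it is proved large enough so it never runs out).
def aloop : Nat → List Int → List Int → Int → Int → List Int → List Int
  | 0, _, _, _, cnt, ans => ans ++ [cnt]
  | _ + 1, [], _, _, cnt, ans => ans ++ [cnt]          -- while-condition false: append cnt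
  | _ + 1, _ :: _, [], _, cnt, ans => ans ++ [cnt]     -- speeds[0] IndexError (outside Pre_)
  | fuel + 1, p :: ps, s :: ss, t, cnt, ans =>
    if 100 ≤ p + t * s then
      aloop fuel ps ss t (cnt + 1) ans                 -- cnt += 1; pop(0); pop(0)
    else if 0 < cnt then
      aloop fuel (p :: ps) (s :: ss) (t + 1) 0 (ans ++ [cnt])   -- flush cnt; time += 1
    else
      aloop fuel (p :: ps) (s :: ss) (t + 1) cnt ans            -- time += 1

def solution (progresses : List Int) (speeds : List Int) : List Int :=
  aloop (progresses.length + (progresses.map (fun p => (100 - p).toNat)).sum + 1)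
    progresses speeds 0 0 []

-- ===== PORT B =====
-- days entry: 0 if p >= 100 else -((p - 100) // s)
def bday (p : Int) (s : Int) : Int :=
  if 100 ≤ p then 0 else -(PySem.Int.floordiv (p - 100) s)

def daysOf (progresses : List Int) (speeds : List Int) : List Int :=
  (progresses.zip speeds).map (fun pr => bday pr.1 pr.2)

-- B's for-loop over days[1:]
def bloop : List Int → Int → Int → List Int → List Int
  | [], _, cnt, ans => ans ++ [cnt]
  | d :: ds, cur, cnt, ans =>
    if d ≤ cur then bloop ds cur (cnt + 1) ans
    else bloop ds d 1 (ans ++ [cnt])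

def solution_alt (progresses : List Int) (speeds : List Int) : List Int :=
  match daysOf progresses speeds with
  | [] => [0]
  | d0 :: rest => bloop rest d0 1 []

-- ===== PRECONDITION & SPEC =====
-- Pre_ restricts to the problem's natural domain: enough speeds, and each task either has
-- positive speed or is already finished with nonnegative speed. Outside it A raises
-- IndexError (speeds shorter than progresses) or loops forever (a task that can never
-- reach 100); tasks with p ≥ 100 and s < 0 are also excluded because whether A terminates
-- on them depends on the time at which they reach the front, not on a closed-form
-- condition of the input (where A does terminate there, e.g. ([100], [-1]), B agrees).
def Pre_solution (progresses : List Int) (speeds : List Int) : Prop :=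
  progresses.length ≤ speeds.length ∧
    ∀ pr ∈ progresses.zip speeds, 1 ≤ pr.2 ∨ (100 ≤ pr.1 ∧ 0 ≤ pr.2)
instance (progresses : List Int) (speeds : List Int) : Decidable (Pre_solution progresses speeds) := by
  unfold Pre_solution; infer_instance

def pvWitness_solution : List Int × List Int := ([93, 30, 55, 100], [1, 30, 5, 0])

def Spec_solution (progresses : List Int) (speeds : List Int) (out : List Int) : Prop :=
  out = solution_alt progresses speeds
instance (progresses : List Int) (speeds : List Int) (out : List Int) : Decidable (Spec_solution progresses speeds out) := by
  unfold Spec_solution; infer_instance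

-- ===== CLAIM (what is proved, stated in full; the proofs are below) =====
def Claim_equal_solution : Prop := ∀ (progresses : List Int) (speeds : List Int), Dom_solution progresses speeds → Pre_solution progresses speeds → Spec_solution progresses speeds (solution progresses speeds)

-- ===== LEMMAS AND PROOFS =====

-- abstract grouping of a days list by running maximum t, with pending count cnt
def gf : List Int → Int → Int → List Int
  | [], _, cnt => [cnt]
  | d :: ds, t, cnt =>
    if d ≤ t then gf ds t (cnt + 1)
    else (if 0 < cnt then [cnt] else []) ++ gf ds d 1

-- the pair condition of Pre_solution
def okPair (p : Int) (s : Int) : Prop := 1 ≤ s ∨ (100 ≤ p ∧ 0 ≤ s)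

theorem bday_le_iff (p s t : Int) (h : okPair p s) (ht : 0 ≤ t) :
    (bday p s ≤ t ↔ 100 ≤ p + t * s) := by
  unfold bday
  by_cases hp : 100 ≤ p
  · simp only [if_pos hp]
    rcases h with hs | ⟨_, hs⟩ <;> constructor <;> intro _ <;> nlinarith
  · have hs : 1 ≤ s := by rcases h with hs | ⟨hp', _⟩ <;> omega
    simp only [if_neg hp]
    have hiff : -t ≤ PySem.Int.floordiv (p - 100) s ↔ -t * s ≤ p - 100 :=
      PySem.Int.le_floordiv_iff_mul_le (by omega)
    constructor
    · intro hle
      have := hiff.1 (by omega)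
      nlinarith
    · intro hc
      have := hiff.2 (by nlinarith)
      omega

theorem bday_nonneg (p s : Int) (h : okPair p s) : 0 ≤ bday p s := by
  unfold bday
  by_cases hp : 100 ≤ p
  · simp [hp]
  · have hs : 1 ≤ s := by rcases h with hs | ⟨hp', _⟩ <;> omega
    simp only [if_neg hp]
    have h1 : PySem.Int.floordiv (p - 100) s < 1 := by
      rw [PySem.Int.floordiv_lt_iff_lt_mul (by omega : (0:Int) < s)]
      nlinarith
    omega

theorem bday_toNat_le (p s : Int) (h : okPair p s) : (bday p s).toNat ≤ (100 - p).toNat := by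
  by_cases hp : 100 ≤ p
  · simp [bday, hp]
  · have hs : 1 ≤ s := by rcases h with hs | ⟨hp', _⟩ <;> omega
    have hle : bday p s ≤ 100 - p := by
      unfold bday
      simp only [if_neg hp]
      have hiff : -(100 - p) ≤ PySem.Int.floordiv (p - 100) s ↔ -(100 - p) * s ≤ p - 100 :=
        PySem.Int.le_floordiv_iff_mul_le (by omega)
      have := hiff.2 (by nlinarith)
      omega
    omega

theorem sum_sub_succ_le (ds : List Int) (t : Int) :
    (ds.map (fun d => (d - (t + 1)).toNat)).sum ≤ (ds.map (fun d => (d - t).toNat)).sum := by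
  induction ds with
  | nil => simp
  | cons d ds ih => simp only [List.map_cons, List.sum_cons]; omega

-- main invariant: with enough fuel, A's loop computes gf over the days list
theorem aloop_eq_gf (fuel : Nat) : ∀ (ps ss : List Int) (t cnt : Int) (ans : List Int),
    ps.length ≤ ss.length →
    (∀ pr ∈ ps.zip ss, okPair pr.1 pr.2) →
    0 ≤ t → 0 ≤ cnt →
    ps.length + ((daysOf ps ss).map (fun d => (d - t).toNat)).sum ≤ fuel →
    aloop fuel ps ss t cnt ans = ans ++ gf (daysOf ps ss) t cnt := by
  induction fuel with
  | zero =>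
    intro ps ss t cnt ans _ _ _ _ hfuel
    have : ps = [] := by
      cases ps with
      | nil => rfl
      | cons p ps => simp at hfuel
    subst this
    simp [aloop, daysOf, gf]
  | succ fuel ih =>
    intro ps ss t cnt ans hlen hok ht hcnt hfuel
    cases ps with
    | nil => simp [aloop, daysOf, gf]
    | cons p ps =>
      cases ss with
      | nil => simp at hlen
      | cons s ss =>
        have hokh : okPair p s := hok (p, s) (by simp)
        have hokt : ∀ pr ∈ ps.zip ss, okPair pr.1 pr.2 := by
          intro pr hpr; exact hok pr (by simp [hpr])
        have hdays : daysOf (p :: ps) (s :: ss) = bday p s :: daysOf ps ss := by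
          simp [daysOf]
        by_cases hc : 100 ≤ p + t * s
        · have hd : bday p s ≤ t := (bday_le_iff p s t hokh ht).2 hc
          rw [aloop, if_pos hc, hdays, gf, if_pos hd]
          apply ih ps ss t (cnt + 1) ans (by simpa using hlen) hokt ht (by omega)
          rw [hdays] at hfuel
          simp only [List.map_cons, List.sum_cons, List.length_cons] at hfuel ⊢
          omega
        · have hd : ¬ bday p s ≤ t := fun h => hc ((bday_le_iff p s t hokh ht).1 h)
          have htd : t < bday p s := by omega
          -- one tick: fuel accounting
          have hfuel' : (p :: ps).length +
              ((daysOf (p :: ps) (s :: ss)).map (fun d => (d - (t + 1)).toNat)).sum ≤ fuel := by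
            rw [hdays] at hfuel ⊢
            have := sum_sub_succ_le (daysOf ps ss) t
            simp only [List.map_cons, List.sum_cons, List.length_cons] at hfuel ⊢
            omega
          have htick : ∀ cnt' ans', cnt' = 0 →
              aloop fuel (p :: ps) (s :: ss) (t + 1) cnt' ans' =
                ans' ++ gf (daysOf ps ss) (bday p s) 1 := by
            intro cnt' ans' hc0
            rw [ih (p :: ps) (s :: ss) (t + 1) cnt' ans' hlen hok (by omega) (by omega) hfuel']
            congr 1
            rw [hdays, gf]
            by_cases hdt : bday p s ≤ t + 1
            · have : bday p s = t + 1 := by omega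
              rw [if_pos hdt, hc0, this]
              norm_num
            · rw [if_neg hdt, hc0]
              simp
          rw [hdays, gf, if_neg hd]
          by_cases hcp : 0 < cnt
          · rw [aloop, if_neg hc, if_pos hcp, htick 0 (ans ++ [cnt]) rfl]
            simp [hcp]
          · have : cnt = 0 := by omega
            rw [aloop, if_neg hc, if_neg hcp, htick cnt ans this]
            simp [hcp]

theorem days_sum_le (ps : List Int) : ∀ ss : List Int,
    (∀ pr ∈ ps.zip ss, okPair pr.1 pr.2) →
    ((daysOf ps ss).map (fun d => (d - 0).toNat)).sum ≤
      (ps.map (fun p => (100 - p).toNat)).sum := by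
  induction ps with
  | nil => intro ss _; simp [daysOf]
  | cons p ps ih =>
    intro ss hok
    cases ss with
    | nil => simp [daysOf]
    | cons s ss =>
      have h1 := bday_toNat_le p s (hok (p, s) (by simp))
      have h2 := ih ss (fun pr hpr => hok pr (by simp [hpr]))
      simp only [daysOf, List.zip_cons_cons, List.map_cons, List.sum_cons] at h2 ⊢
      omega

theorem bloop_eq_gf (ds : List Int) : ∀ (cur cnt : Int) (ans : List Int), 0 < cnt →
    bloop ds cur cnt ans = ans ++ gf ds cur cnt := by
  induction ds with
  | nil => intro cur cnt ans _; simp [bloop, gf]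
  | cons d ds ih =>
    intro cur cnt ans hcnt
    by_cases h : d ≤ cur
    · rw [bloop, if_pos h, gf, if_pos h, ih cur (cnt + 1) ans (by omega)]
    · rw [bloop, if_neg h, gf, if_neg h, ih d 1 (ans ++ [cnt]) (by omega)]
      simp [hcnt]

theorem days_mem_nonneg (ps ss : List Int)
    (hok : ∀ pr ∈ ps.zip ss, okPair pr.1 pr.2) :
    ∀ d ∈ daysOf ps ss, 0 ≤ d := by
  intro d hd
  simp only [daysOf, List.mem_map] at hd
  obtain ⟨pr, hpr, rfl⟩ := hd
  exact bday_nonneg pr.1 pr.2 (hok pr hpr)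

-- ===== VERDICT (by name: the statement is the Claim_ definition above) =====
theorem solution_spec : Claim_equal_solution := by
  intro ps ss _ hpre
  obtain ⟨hlen, hok⟩ := hpre
  unfold Spec_solution solution
  have hfuel : ps.length + ((daysOf ps ss).map (fun d => (d - 0).toNat)).sum ≤
      ps.length + (ps.map (fun p => (100 - p).toNat)).sum + 1 := by
    have := days_sum_le ps ss hok
    omega
  rw [aloop_eq_gf _ ps ss 0 0 [] hlen hok le_rfl le_rfl hfuel]
  have hnn := days_mem_nonneg ps ss hok
  unfold solution_alt
  cases hds : daysOf ps ss with
  | nil => simp [gf]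
  | cons d rest =>
    have hd0 : 0 ≤ d := hnn d (by simp [hds])
    change _ = bloop rest d 1 []
    rw [bloop_eq_gf rest d 1 [] (by omega)]
    simp only [List.nil_append, gf]
    by_cases h : d ≤ (0 : Int)
    · have : d = 0 := le_antisymm h hd0
      rw [if_pos h, this]
      norm_num
    · rw [if_neg h]
      simp
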